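-- pv_equiv track=rewrite | github.com/lummoxx/AoC24 | day2.py | check
-- ===== SOURCE A (Python) =====
-- def check(nums : list) -> bool :
--     safe = True
--     increasing = int(nums[1]) > int(nums[0])
--     decreasing = int(nums[0]) > int(nums[1])
--     for n in range(1,len(nums)):
--         gap = int(nums[n]) - int(nums[n-1])
--         if decreasing :
--             if not (gap in [-1, -2, -3]):
--                 safe = False
--         elif increasing :
--             if not(gap in [1, 2, 3]):
--                 safe = False
--         else :
--             safe = False
--     return safe
-- ===== SOURCE B (Python) =====
-- def check(nums : list) -> bool :
--     diffs = [int(b) - int(a) for a, b in zip(nums, nums[1:])]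
--     return all(1 <= d <= 3 for d in diffs) or all(-3 <= d <= -1 for d in diffs)
-- ===== Notes on version B (the rewrite author's own statement) =====
-- stated objective: simpler
-- what changed: B builds the diff list once with zip and replaces A's increasing/decreasing flags and per-element branching by two all() range checks combined with or.
-- outside the precondition, e.g. on check([1]): A raises IndexError, B returns True
-- crash fix: On lists of length < 2 A raises IndexError at nums[1] while B returns True (vacuously safe). — e.g. on check([]): A raises IndexError, B returns true
import Mathlib
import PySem

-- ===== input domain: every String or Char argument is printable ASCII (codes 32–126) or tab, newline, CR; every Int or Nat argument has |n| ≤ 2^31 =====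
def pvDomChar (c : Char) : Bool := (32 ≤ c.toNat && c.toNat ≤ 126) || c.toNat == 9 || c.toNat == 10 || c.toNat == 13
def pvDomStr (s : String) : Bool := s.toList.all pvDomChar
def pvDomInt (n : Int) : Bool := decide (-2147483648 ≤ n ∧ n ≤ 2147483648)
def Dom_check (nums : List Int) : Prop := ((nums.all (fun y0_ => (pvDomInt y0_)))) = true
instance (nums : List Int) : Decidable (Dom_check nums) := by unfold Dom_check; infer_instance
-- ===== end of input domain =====

-- B replaces A's increasing/decreasing flags and per-index loop by a zip-built diff list
-- checked with two all-range tests combined with or; objective: simpler.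


-- ===== PORT A =====
-- one iteration of A's loop body, applied to the flags, the running flag `safe` and `gap`
def checkStep (increasing decreasing : Bool) (safe : Bool) (gap : Int) : Bool :=
  if decreasing then
    (if ¬ (gap = -1 ∨ gap = -2 ∨ gap = -3) then false else safe)
  else if increasing then
    (if ¬ (gap = 1 ∨ gap = 2 ∨ gap = 3) then false else safe)
  else false

-- the for-loop of A, with the two flags computed before it as parameters
def checkLoop (nums : List Int) (increasing decreasing : Bool) : Bool :=
  (PySem.List.pyRange 1 (nums.length : Int) 1).foldl (fun safe n =>
      checkStep increasing decreasing safe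
        (PySem.List.pyGetD nums n 0 - PySem.List.pyGetD nums (n - 1) 0)) true

def check (nums : List Int) : Bool :=
  match PySem.List.pyGet? nums 1, PySem.List.pyGet? nums 0 with
  | some n1, some n0 => checkLoop nums (decide (n1 > n0)) (decide (n0 > n1))
  | _, _ => false    -- IndexError in Python: excluded by Pre_check

-- ===== PORT B =====
def check_alt (nums : List Int) : Bool :=
  let diffs := (nums.zip nums.tail).map (fun p => p.2 - p.1)
  diffs.all (fun d => decide (1 ≤ d ∧ d ≤ 3)) || diffs.all (fun d => decide (-3 ≤ d ∧ d ≤ -1))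

-- ===== PRECONDITION & SPEC =====
-- Pre_ excludes lists of length < 2, on which A raises IndexError at nums[1].
def Pre_check (nums : List Int) : Prop := 2 ≤ nums.length
instance (nums : List Int) : Decidable (Pre_check nums) := by unfold Pre_check; infer_instance
def pvWitness_check : List Int := [1, 3, 4]

-- On lists of length < 2 A raises IndexError at nums[1] while B returns True (vacuously safe).
def Raises_check (nums : List Int) : Prop := nums.length < 2
instance (nums : List Int) : Decidable (Raises_check nums) := by unfold Raises_check; infer_instance
def pvRaiseWitness_check : List Int := []
def pvRaiseWitnessOut_check : Bool := true

def Spec_check (nums : List Int) (out : Bool) : Prop := out = check_alt nums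
instance (nums : List Int) (out : Bool) : Decidable (Spec_check nums out) := by unfold Spec_check; infer_instance

-- ===== CLAIM (what is proved, stated in full; the proofs are below) =====
def Claim_equal_check : Prop := ∀ (nums : List Int), Dom_check nums → Pre_check nums → Spec_check nums (check nums)
def Claim_raises_check : Prop := (∀ (nums : List Int), Dom_check nums → Raises_check nums → ¬ Pre_check nums) ∧ (Dom_check (pvRaiseWitness_check) ∧ Raises_check (pvRaiseWitness_check) ∧ check_alt (pvRaiseWitness_check) = pvRaiseWitnessOut_check)

-- ===== LEMMAS AND PROOFS =====

-- the diff list built from indices equals the zip-built diff list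
theorem diffs_range_eq_zip (nums : List Int) :
    (List.range (nums.length - 1)).map (fun k => nums.getD (k+1) 0 - nums.getD k 0)
      = (nums.zip nums.tail).map (fun p => p.2 - p.1) := by
  induction nums with
  | nil => simp
  | cons a t ih =>
    cases t with
    | nil => simp
    | cons b t' =>
      simp only [List.length_cons, Nat.add_sub_cancel] at ih ⊢
      rw [List.range_succ_eq_map]
      simp only [List.map_cons, List.map_map, List.tail_cons, List.zip_cons_cons]
      refine List.cons_eq_cons.mpr ⟨by simp, ?_⟩
      rw [List.tail_cons] at ih
      rw [← ih]
      apply List.map_congr_left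
      intro k _
      simp [List.getD]

-- A's index loop, seen as a fold over the diff list
theorem checkLoop_eq_foldl_diffs (nums : List Int) (g : Bool → Int → Bool) :
    (PySem.List.pyRange 1 (nums.length : Int) 1).foldl
      (fun safe n => g safe (PySem.List.pyGetD nums n 0 - PySem.List.pyGetD nums (n - 1) 0)) true
    = ((nums.zip nums.tail).map (fun p => p.2 - p.1)).foldl g true := by
  rw [PySem.List.pyRange_one, List.foldl_map]
  have hlen : (((nums.length : Int)) - 1).toNat = nums.length - 1 := by omega
  rw [hlen, ← diffs_range_eq_zip, List.foldl_map]
  apply PySem.List.foldl_congr_mem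
  intro acc k _
  have h1 : (1 + (k : Int)) = ((k + 1 : Nat) : Int) := by push_cast; ring
  rw [h1, PySem.List.pyGetD_natCast]
  rw [show ((((k + 1 : Nat) : Int)) - 1) = ((k : Nat) : Int) by push_cast; ring, PySem.List.pyGetD_natCast]

-- a fold that turns off `safe` whenever the element fails P is `all P`
theorem foldl_safe_all (P : Int → Bool) (l : List Int) :
    l.foldl (fun safe d => if P d then safe else false) true = l.all P := by
  have key : ∀ (l : List Int) (s : Bool),
      l.foldl (fun safe d => if P d then safe else false) s = (s && l.all P) := by
    intro l
    induction l with
    | nil => simp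
    | cons x xs ih =>
      intro s
      simp only [List.foldl_cons, List.all_cons, ih]
      cases P x <;> simp
  simpa using key l true

theorem check_cons (a b : Int) (t : List Int) :
    check (a :: b :: t) = checkLoop (a :: b :: t) (decide (b > a)) (decide (a > b)) := by
  unfold check
  rw [show (1:Int) = ((1:Nat):Int) from rfl,
      PySem.List.pyGet?_ofNat (a::b::t) 1 (by simp), PySem.List.pyGet?_zero_cons]
  rfl

theorem check_spec : Claim_equal_check := by
  intro nums _hdom hpre
  unfold Spec_check
  match nums, hpre with
  | a :: b :: t, _ =>
    rw [check_cons]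
    have hhead : ((a :: b :: t).zip (a :: b :: t).tail).map (fun p => p.2 - p.1)
        = (b - a) :: ((b :: t).zip t).map (fun p => p.2 - p.1) := by simp
    rcases lt_trichotomy a b with hab | hab | hab
    · -- increasing: A checks every gap against {1,2,3}; B's second all is killed by the first diff
      unfold checkLoop
      rw [checkLoop_eq_foldl_diffs]
      have hA : (((a :: b :: t).zip (a :: b :: t).tail).map (fun p => p.2 - p.1)).foldl
            (checkStep (decide (b > a)) (decide (a > b))) true
          = (((a :: b :: t).zip (a :: b :: t).tail).map (fun p => p.2 - p.1)).all
              (fun d => decide (1 ≤ d ∧ d ≤ 3)) := by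
        rw [← foldl_safe_all]
        apply PySem.List.foldl_congr_mem
        intro acc d _
        unfold checkStep
        simp only [decide_eq_true_eq]
        rw [if_neg (by omega), if_pos (by omega)]
        by_cases h : d = 1 ∨ d = 2 ∨ d = 3 <;> · simp [h]; try omega
      rw [hA]
      simp only [check_alt]
      have hsnd : (((a :: b :: t).zip (a :: b :: t).tail).map (fun p => p.2 - p.1)).all
          (fun d => decide (-3 ≤ d ∧ d ≤ -1)) = false := by
        rw [hhead]
        simp only [List.all_cons, Bool.and_eq_false_iff]
        exact Or.inl (by simp only [decide_eq_false_iff_not, not_and]; intro h; omega)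
      rw [hsnd, Bool.or_false]
    · -- equal first pair: A's loop body is constantly false on a nonempty range; B sees the diff 0
      subst hab
      unfold checkLoop
      rw [checkLoop_eq_foldl_diffs]
      rw [hhead]
      have hconst : ∀ (l : List Int) (s : Bool),
          l.foldl (checkStep (decide (a > a)) (decide (a > a))) s = (if l.isEmpty then s else false) := by
        intro l
        induction l with
        | nil => simp
        | cons x xs ih =>
          intro s
          rw [List.foldl_cons, show checkStep (decide (a > a)) (decide (a > a)) s x = false by
            simp [checkStep], ih]
          simp
      rw [List.foldl_cons, hconst]
      simp only [check_alt]
      rw [hhead]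
      simp [checkStep]
    · -- decreasing: A checks every gap against {-1,-2,-3}; B's first all is killed by the first diff
      unfold checkLoop
      rw [checkLoop_eq_foldl_diffs]
      have hA : (((a :: b :: t).zip (a :: b :: t).tail).map (fun p => p.2 - p.1)).foldl
            (checkStep (decide (b > a)) (decide (a > b))) true
          = (((a :: b :: t).zip (a :: b :: t).tail).map (fun p => p.2 - p.1)).all
              (fun d => decide (-3 ≤ d ∧ d ≤ -1)) := by
        rw [← foldl_safe_all]
        apply PySem.List.foldl_congr_mem
        intro acc d _
        unfold checkStep
        simp only [decide_eq_true_eq]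
        rw [if_pos (by omega)]
        by_cases h : d = -1 ∨ d = -2 ∨ d = -3 <;> · simp [h]; try omega
      rw [hA]
      simp only [check_alt]
      have hfst : (((a :: b :: t).zip (a :: b :: t).tail).map (fun p => p.2 - p.1)).all
          (fun d => decide (1 ≤ d ∧ d ≤ 3)) = false := by
        rw [hhead]
        simp only [List.all_cons, Bool.and_eq_false_iff]
        exact Or.inl (by simp only [decide_eq_false_iff_not, not_and]; intro h; omega)
      rw [hfst, Bool.false_or]

theorem check_raises : Claim_raises_check := by
  unfold Claim_raises_check
  refine ⟨fun nums _ h hp => ?_, by decide⟩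
  unfold Raises_check at h
  unfold Pre_check at hp
  omega

-- self-check: the raise witness satisfies Raises_check and B's port returns the stated literal there
theorem check_raises_witness_ok : Raises_check pvRaiseWitness_check ∧ check_alt pvRaiseWitness_check = pvRaiseWitnessOut_check := check_raises.2.2
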